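-- pv_equiv track=rewrite | github.com/raeez/chiral-bar-cobar | compute/lib/theorem_higher_dim_modular_operad_engine.py | _edge_configs
-- ===== SOURCE A (Python) =====
-- from typing import Any, Dict, List, Optional, Tuple
--
-- def _edge_configs(nv: int, ne: int):
--     """All multisets of ne edges on nv vertices (including self-loops).
--
--     Edges are (v1, v2) with v1 <= v2.
--     """
--     if ne == 0:
--         yield ()
--         return
--     # Generate all possible edge slots
--     slots = []
--     for i in range(nv):
--         for j in range(i, nv):
--             slots.append((i, j))
--
--     for combo in _multiset_combos(slots, ne):
--         yield tuple(sorted(combo))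
--
-- def _multiset_combos(items: List[Tuple[int, int]], k: int, start: int = 0):
--     """Choose k items from items[start:] with repetition, sorted."""
--     if k == 0:
--         yield []
--         return
--     for i in range(start, len(items)):
--         for rest in _multiset_combos(items, k - 1, i):
--             yield [items[i]] + rest
-- ===== SOURCE B (Python) =====
-- def _edge_configs(nv: int, ne: int):
--     """All multisets of ne edges on nv vertices (including self-loops).
--
--     Edges are (v1, v2) with v1 <= v2.
--     """
--     if ne == 0:
--         yield ()
--         return
--     slots = [(i, j) for i in range(nv) for j in range(i, nv)]
--     if not slots:
--         return
--     n = len(slots)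
--     idx = [0] * ne  # nondecreasing odometer into slots
--     while True:
--         yield tuple(slots[t] for t in idx)
--         # advance: rightmost position that can still grow
--         p = ne - 1
--         while p >= 0 and idx[p] == n - 1:
--             p -= 1
--         if p < 0:
--             return
--         v = idx[p] + 1
--         for q in range(p, ne):
--             idx[q] = v
-- ===== Notes on version B (the rewrite author's own statement) =====
-- stated objective: alternative
-- what changed: Replaces the branching recursive _multiset_combos generator (plus a redundant per-combo sort) with an iterative odometer: one nondecreasing index list into the flat slots list, advanced in place by a rightmost-carry step, yielding the same multisets in the same lexicographic order with no recursion and no sorting; Pre_ excludes ne < 0 with nv > 0, where A's recursion never terminates (RecursionError).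
import Mathlib
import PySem

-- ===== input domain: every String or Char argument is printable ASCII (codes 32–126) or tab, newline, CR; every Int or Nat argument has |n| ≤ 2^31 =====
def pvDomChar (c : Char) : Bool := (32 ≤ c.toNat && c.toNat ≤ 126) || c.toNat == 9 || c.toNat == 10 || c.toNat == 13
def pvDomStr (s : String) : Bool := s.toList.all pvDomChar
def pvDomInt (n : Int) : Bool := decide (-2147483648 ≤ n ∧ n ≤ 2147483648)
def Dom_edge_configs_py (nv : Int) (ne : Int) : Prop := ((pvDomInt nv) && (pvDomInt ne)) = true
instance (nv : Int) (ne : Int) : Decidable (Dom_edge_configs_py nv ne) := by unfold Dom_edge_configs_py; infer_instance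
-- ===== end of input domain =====

-- B replaces A's recursive _multiset_combos generator (and its redundant per-combo sort) by an
-- iterative odometer over one nondecreasing index list, yielding the same multisets in the same
-- order (objective: alternative).  Both Pythons are generators; the ports return the yielded list.

-- ===== PORT A =====
-- _multiset_combos(items, k, start): k is a Python int and the recursion descends k-1 per level,
-- so fuel = ne.toNat makes it structural (A calls it with k = ne; for k < 0 Python only returns
-- when the index range is empty, where the fuel-0 branch returns [] as well).
-- items[i] is always in range here, so getD is exact.
def msCombos (items : List (Int × Int)) : Nat → Int → Nat → List (List (Int × Int))
  | fuel, k, start =>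
    if k = 0 then [[]]
    else
      match fuel with
      | 0 => []
      | f + 1 =>
        (List.range' start (items.length - start)).flatMap (fun i =>
          (msCombos items f (k - 1) i).map (fun rest => items.getD i (0, 0) :: rest))

def edge_configs_py (nv : Int) (ne : Int) : List (List (Int × Int)) :=
  if ne = 0 then [[]]
  else
    let slots := (PySem.List.pyRange 0 nv 1).foldl (fun acc i =>
      acc ++ (PySem.List.pyRange i nv 1).foldl (fun acc2 j => acc2 ++ [(i, j)]) []) []
    (msCombos slots ne.toNat ne 0).map (fun combo => PySem.List.sorted2 combo Prod.fst Prod.snd)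

-- ===== PORT B =====
-- carry step of the odometer: the rightmost position whose slot index can still grow is
-- incremented and every later position is set equal to it; none = odometer exhausted.
def odoStep (n : Nat) : List Nat → Option (List Nat)
  | [] => none
  | x :: rest =>
    match odoStep n rest with
    | some rest' => some (x :: rest')
    | none => if x + 1 < n then some (List.replicate (rest.length + 1) (x + 1)) else none

-- the 'while True' loop; fuel = n ^ k bounds the number of yields (proved below).
-- slots[t] is always in range here, so getD is exact.
def odoRun (slots : List (Int × Int)) (n : Nat) : List Nat → Nat → List (List (Int × Int))
  | _, 0 => []
  | idx, f + 1 =>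
    (idx.map fun t => slots.getD t (0, 0)) ::
      (match odoStep n idx with
       | none => []
       | some idx' => odoRun slots n idx' f)

def edge_configs_py_alt (nv : Int) (ne : Int) : List (List (Int × Int)) :=
  if ne = 0 then [[]]
  else
    let slots := (PySem.List.pyRange 0 nv 1).flatMap (fun i =>
      (PySem.List.pyRange i nv 1).map (fun j => (i, j)))
    if slots = [] then []
    else odoRun slots slots.length (List.replicate ne.toNat 0) (slots.length ^ ne.toNat)

-- ===== PRECONDITION & SPEC =====
-- Pre_ excludes ne < 0 with nv > 0: there _multiset_combos(slots, ne) recurses on k-1 forever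
-- and Python raises RecursionError; on every other input A returns normally.
def Pre_edge_configs_py (nv : Int) (ne : Int) : Prop := 0 ≤ ne ∨ nv ≤ 0
instance (nv : Int) (ne : Int) : Decidable (Pre_edge_configs_py nv ne) := by unfold Pre_edge_configs_py; infer_instance
def pvWitness_edge_configs_py : Int × Int := (3, 2)

def Spec_edge_configs_py (nv : Int) (ne : Int) (out : List (List (Int × Int))) : Prop := out = edge_configs_py_alt nv ne
instance (nv : Int) (ne : Int) (out : List (List (Int × Int))) : Decidable (Spec_edge_configs_py nv ne out) := by unfold Spec_edge_configs_py; infer_instance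

-- ===== CLAIM (what is proved, stated in full; the proofs are below) =====
def Claim_equal_edge_configs_py : Prop := ∀ (nv : Int) (ne : Int), Dom_edge_configs_py nv ne → Pre_edge_configs_py nv ne → Spec_edge_configs_py nv ne (edge_configs_py nv ne)

-- ===== LEMMAS AND PROOFS =====

-- the index lists the recursive enumerator of A walks through: nondecreasing sequences of
-- length k over [s, n), in lexicographic order
def EnumIdx (n : Nat) : Nat → Nat → List (List Nat)
  | 0, _ => [[]]
  | k + 1, s => (List.range' s (n - s)).flatMap (fun i => (EnumIdx n k i).map (fun u => i :: u))

-- the tail of that enumeration that starts at state v (everything lex-≥ v)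
def EnumFrom (n : Nat) : List Nat → List (List Nat)
  | [] => [[]]
  | x :: w => (EnumFrom n w).map (fun u => x :: u) ++
      (List.range' (x + 1) (n - (x + 1))).flatMap (fun i => (EnumIdx n w.length i).map (fun u => i :: u))

-- B's loop at index level
def odoRunIdx (n : Nat) : List Nat → Nat → List (List Nat)
  | _, 0 => []
  | idx, f + 1 =>
    idx :: (match odoStep n idx with
            | none => []
            | some idx' => odoRunIdx n idx' f)

theorem odoRun_eq_odoRunIdx (slots : List (Int × Int)) (n : Nat) :
    ∀ (f : Nat) (idx : List Nat),
      odoRun slots n idx f = (odoRunIdx n idx f).map (fun u => u.map (fun t => slots.getD t (0, 0))) := by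
  intro f
  induction f with
  | zero => intro idx; simp [odoRun, odoRunIdx]
  | succ f ih =>
    intro idx
    simp only [odoRun, odoRunIdx]
    cases h : odoStep n idx with
    | none => simp
    | some idx' => simp [ih]

theorem enumFrom_replicate (n : Nat) :
    ∀ (m j : Nat), j < n → EnumFrom n (List.replicate m j) = EnumIdx n m j := by
  intro m
  induction m with
  | zero => intro j _; simp [EnumFrom, EnumIdx]
  | succ m ih =>
    intro j hj
    rw [List.replicate_succ]
    simp only [EnumFrom, List.length_replicate, ih j hj]
    have h1 : n - j = (n - (j + 1)) + 1 := by omega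
    conv_rhs => rw [EnumIdx, h1, List.range'_succ]
    simp [List.flatMap_cons]

theorem enumFrom_ne_nil (n : Nat) : ∀ v : List Nat, EnumFrom n v ≠ [] := by
  intro v
  induction v with
  | nil => simp [EnumFrom]
  | cons x w ih =>
    simp only [EnumFrom]
    intro h
    rcases List.append_eq_nil_iff.mp h with ⟨h1, _⟩
    exact ih (List.map_eq_nil_iff.mp h1)

theorem mem_enumIdx (n : Nat) :
    ∀ (k s : Nat) (u : List Nat), u ∈ EnumIdx n k s →
      u.Pairwise (· ≤ ·) ∧ ∀ t ∈ u, s ≤ t ∧ t < n := by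
  intro k
  induction k with
  | zero =>
    intro s u hu
    simp only [EnumIdx, List.mem_singleton] at hu
    subst hu; simp
  | succ k ih =>
    intro s u hu
    simp only [EnumIdx, List.mem_flatMap, List.mem_map] at hu
    obtain ⟨i, hi, u', hu', rfl⟩ := hu
    have hi' : s ≤ i ∧ i < n := by
      have h := List.mem_range'_1.mp hi
      omega
    obtain ⟨hp, hb⟩ := ih i u' hu'
    refine ⟨List.pairwise_cons.mpr ⟨fun t ht => (hb t ht).1, hp⟩, ?_⟩
    intro t ht
    rcases List.mem_cons.mp ht with rfl | ht'
    · exact hi'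
    · have h := hb t ht'
      exact ⟨le_trans hi'.1 h.1, h.2⟩

theorem odoStep_spec (n : Nat) :
    ∀ v : List Nat, (∀ x ∈ v, x < n) → v.Pairwise (· ≤ ·) →
      (odoStep n v = none → EnumFrom n v = [v]) ∧
      (∀ v', odoStep n v = some v' →
        ((∀ x ∈ v', x < n) ∧ v'.Pairwise (· ≤ ·)) ∧ EnumFrom n v = v :: EnumFrom n v' ∧
        v'.length = v.length ∧ ∀ y ∈ v', v.headD 0 ≤ y) := by
  intro v
  induction v with
  | nil =>
    intro _ _
    constructor
    · intro _; rfl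
    · intro v' h; simp [odoStep] at h
  | cons x w ih =>
    intro hb hp
    have hbw : ∀ y ∈ w, y < n := fun y hy => hb y (List.mem_cons_of_mem _ hy)
    have hpw : w.Pairwise (· ≤ ·) := (List.pairwise_cons.mp hp).2
    have hxw : ∀ y ∈ w, x ≤ y := (List.pairwise_cons.mp hp).1
    have hx : x < n := hb x (by simp)
    obtain ⟨ihn, ihs⟩ := ih hbw hpw
    cases hw : odoStep n w with
    | some w' =>
      obtain ⟨⟨hb', hp'⟩, henum, hlen, hhead⟩ := ihs w' hw
      have hwne : w ≠ [] := by
        intro hnil; rw [hnil] at hw; simp [odoStep] at hw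
      have hxw' : ∀ y ∈ w', x ≤ y := by
        intro y hy
        have h1 : x ≤ w.headD 0 := by
          cases w with
          | nil => exact absurd rfl hwne
          | cons a t => exact hxw a (by simp)
        exact le_trans h1 (hhead y hy)
      constructor
      · intro hnone; simp [odoStep, hw] at hnone
      · intro v' hv'
        have hv'eq : v' = x :: w' := by
          simp only [odoStep, hw] at hv'
          exact (Option.some_inj.mp hv').symm
        subst hv'eq
        refine ⟨⟨?_, List.pairwise_cons.mpr ⟨hxw', hp'⟩⟩, ?_, ?_, ?_⟩
        · intro y hy
          rcases List.mem_cons.mp hy with rfl | hy'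
          · exact hx
          · exact hb' y hy'
        · simp only [EnumFrom, henum, hlen, List.map_cons]
          simp
        · simp [hlen]
        · intro y hy
          rcases List.mem_cons.mp hy with rfl | hy'
          · simp
          · simpa using hxw' y hy'
    | none =>
      have henw : EnumFrom n w = [w] := ihn hw
      by_cases hxn : x + 1 < n
      · constructor
        · intro hnone; simp [odoStep, hw, hxn] at hnone
        · intro v' hv'
          have hv'eq : v' = List.replicate (w.length + 1) (x + 1) := by
            simp only [odoStep, hw, if_pos hxn] at hv'
            exact (Option.some_inj.mp hv').symm
          subst hv'eq
          refine ⟨⟨?_, ?_⟩, ?_, ?_, ?_⟩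
          · intro y hy
            rcases List.eq_of_mem_replicate hy with rfl
            exact hxn
          · simp
          · rw [enumFrom_replicate n (w.length + 1) (x + 1) hxn]
            simp only [EnumFrom, henw, List.map_cons, List.map_nil]
            conv_rhs => rw [EnumIdx]
            simp
          · simp
          · intro y hy
            rcases List.eq_of_mem_replicate hy with rfl
            simp
      · constructor
        · intro _
          simp only [EnumFrom, henw, List.map_cons, List.map_nil]
          have h0 : n - (x + 1) = 0 := by omega
          rw [h0]
          simp
        · intro v' hv'
          simp [odoStep, hw, hxn] at hv'

theorem odoRunIdx_eq_enumFrom (n : Nat) :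
    ∀ (f : Nat) (v : List Nat), (∀ x ∈ v, x < n) → v.Pairwise (· ≤ ·) →
      (EnumFrom n v).length ≤ f → odoRunIdx n v f = EnumFrom n v := by
  intro f
  induction f with
  | zero =>
    intro v _ _ hl
    have h := enumFrom_ne_nil n v
    cases hE : EnumFrom n v with
    | nil => exact absurd hE h
    | cons a l => rw [hE] at hl; simp at hl
  | succ f ih =>
    intro v hb hp hl
    obtain ⟨hnone, hsome⟩ := odoStep_spec n v hb hp
    cases hs : odoStep n v with
    | none => simp [odoRunIdx, hs, hnone hs]
    | some v' =>
      obtain ⟨⟨hb', hp'⟩, henum, _, _⟩ := hsome v' hs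
      have hl' : (EnumFrom n v').length ≤ f := by
        rw [henum] at hl; simpa using hl
      simp [odoRunIdx, hs, henum, ih v' hb' hp' hl']

theorem flatMap_length_le {g : Nat → List (List Nat)} (m : Nat) :
    ∀ l : List Nat, (∀ i ∈ l, (g i).length ≤ m) → (l.flatMap g).length ≤ l.length * m := by
  intro l
  induction l with
  | nil => simp
  | cons a l ih =>
    intro h
    have h1 := h a (by simp)
    have h2 := ih (fun i hi => h i (List.mem_cons_of_mem _ hi))
    simp only [List.flatMap_cons, List.length_append, List.length_cons]
    calc (g a).length + (l.flatMap g).length ≤ m + l.length * m := Nat.add_le_add h1 h2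
      _ = (l.length + 1) * m := by ring

theorem enumIdx_length_le (n : Nat) : ∀ k s : Nat, (EnumIdx n k s).length ≤ n ^ k := by
  intro k
  induction k with
  | zero => intro s; simp [EnumIdx]
  | succ k ih =>
    intro s
    have h1 : ∀ i ∈ List.range' s (n - s), ((EnumIdx n k i).map (fun u => i :: u)).length ≤ n ^ k := by
      intro i _; simpa using ih i
    have h2 := flatMap_length_le (n ^ k) (List.range' s (n - s)) h1
    rw [List.length_range'] at h2
    calc (EnumIdx n (k + 1) s).length ≤ (n - s) * n ^ k := h2
      _ ≤ n * n ^ k := Nat.mul_le_mul_right _ (Nat.sub_le n s)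
      _ = n ^ (k + 1) := by ring

theorem msCombos_eq_enumIdx (items : List (Int × Int)) :
    ∀ (k : Nat) (s : Nat), msCombos items k (k : Int) s =
      (EnumIdx items.length k s).map (fun u => u.map (fun t => items.getD t (0, 0))) := by
  intro k
  induction k with
  | zero => intro s; simp [msCombos, EnumIdx]
  | succ k ih =>
    intro s
    have hk : ((k + 1 : Nat) : Int) ≠ 0 := by exact_mod_cast Nat.succ_ne_zero k
    have hc : ((k + 1 : Nat) : Int) - 1 = (k : Int) := by push_cast; ring
    simp only [msCombos, if_neg hk, hc, ih, EnumIdx]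
    simp [List.map_flatMap, List.map_map, Function.comp_def]

theorem msCombos_nil (f : Nat) (k : Int) (hk : k ≠ 0) : msCombos [] f k 0 = [] := by
  cases f with
  | zero => simp [msCombos, hk]
  | succ f => simp [msCombos, hk]

-- the comparator sorted2 uses, specialised to pairs with keys fst, snd
theorem lex_comparator_false {a b : Int × Int}
    (h : a.1 < b.1 ∨ (a.1 = b.1 ∧ a.2 ≤ b.2)) :
    (decide (b.1 < a.1) || (!decide (a.1 < b.1) && decide (b.2 < a.2))) = false := by
  rcases h with h | ⟨h1, h2⟩ <;> simp <;> omega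

def LexLt (a b : Int × Int) : Prop := a.1 < b.1 ∨ (a.1 = b.1 ∧ a.2 < b.2)

theorem slots_pairwise (nv : Int) :
    ((PySem.List.pyRange 0 nv 1).flatMap (fun i =>
      (PySem.List.pyRange i nv 1).map (fun j => (i, j)))).Pairwise LexLt := by
  rw [List.pairwise_flatMap]
  constructor
  · intro i _
    rw [List.pairwise_map]
    exact (PySem.List.pairwise_lt_pyRange_one i nv).imp (fun h => Or.inr ⟨rfl, h⟩)
  · refine (PySem.List.pairwise_lt_pyRange_one 0 nv).imp ?_
    intro i1 i2 h x hx y hy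
    obtain ⟨j1, _, rfl⟩ := List.mem_map.mp hx
    obtain ⟨j2, _, rfl⟩ := List.mem_map.mp hy
    exact Or.inl h

theorem slots_getD_mono (slots : List (Int × Int)) (hp : slots.Pairwise LexLt)
    (t t' : Nat) (h1 : t ≤ t') (h2 : t' < slots.length) :
    (decide ((slots.getD t' (0, 0)).1 < (slots.getD t (0, 0)).1) ||
     (!decide ((slots.getD t (0, 0)).1 < (slots.getD t' (0, 0)).1) &&
       decide ((slots.getD t' (0, 0)).2 < (slots.getD t (0, 0)).2))) = false := by
  apply lex_comparator_false
  rcases Nat.eq_or_lt_of_le h1 with rfl | hlt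
  · right; exact ⟨rfl, le_refl _⟩
  · have ht : t < slots.length := lt_trans hlt h2
    rw [List.getD_eq_getElem slots _ ht, List.getD_eq_getElem slots _ h2]
    have h := List.pairwise_iff_getElem.mp hp t t' ht h2 hlt
    rcases h with h | ⟨ha, hb⟩
    · exact Or.inl h
    · exact Or.inr ⟨ha, le_of_lt hb⟩

theorem combo_pairwise (slots : List (Int × Int)) (hp : slots.Pairwise LexLt) :
    ∀ u : List Nat, u.Pairwise (· ≤ ·) → (∀ t ∈ u, t < slots.length) →
      (u.map (fun t => slots.getD t (0, 0))).Pairwise (fun a b : Int × Int =>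
        (decide (b.1 < a.1) || (!decide (a.1 < b.1) && decide (b.2 < a.2))) = false) := by
  intro u hu hb
  rw [List.pairwise_map]
  refine List.Pairwise.imp_of_mem ?_ hu
  intro t t' ht ht' hle
  exact slots_getD_mono slots hp t t' hle (hb t' ht')

theorem foldl_insertBy_append {α : Type} (before : α → α → Bool) :
    ∀ (xs acc : List α), (∀ x ∈ xs, ∀ y ∈ acc, before x y = false) →
      xs.Pairwise (fun a b => before b a = false) →
      xs.foldl (fun acc x => PySem.List.insertBy before x acc) acc = acc ++ xs := by
  intro xs
  induction xs with
  | nil => intro acc _ _; simp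
  | cons x xs ih =>
    intro acc hcross hp
    obtain ⟨hx, hp'⟩ := List.pairwise_cons.mp hp
    rw [List.foldl_cons,
      PySem.List.insertBy_of_forall_not_before _ _ _ (fun y hy => hcross x (by simp) y hy)]
    rw [ih (acc ++ [x]) ?_ hp']
    · simp
    · intro z hz y hy
      rcases List.mem_append.mp hy with hy' | hy'
      · exact hcross z (List.mem_cons_of_mem _ hz) y hy'
      · rw [List.mem_singleton.mp hy']
        exact hx z hz

theorem sorted2_eq_self_of_pairwise (xs : List (Int × Int))
    (h : xs.Pairwise (fun a b : Int × Int =>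
      (decide (b.1 < a.1) || (!decide (a.1 < b.1) && decide (b.2 < a.2))) = false)) :
    PySem.List.sorted2 xs Prod.fst Prod.snd = xs := by
  have heq : PySem.List.sorted2 xs Prod.fst Prod.snd =
      xs.foldl (fun acc x => PySem.List.insertBy
        (fun a b : Int × Int => decide (a.1 < b.1) || (!decide (b.1 < a.1) && decide (a.2 < b.2)))
        x acc) [] := rfl
  rw [heq, foldl_insertBy_append _ xs [] (by simp) h]
  simp

theorem main_case (slots : List (Int × Int)) (hp : slots.Pairwise LexLt)
    (hne : slots ≠ []) (k : Nat) :
    (msCombos slots k (k : Int) 0).map (fun combo => PySem.List.sorted2 combo Prod.fst Prod.snd) =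
    odoRun slots slots.length (List.replicate k 0) (slots.length ^ k) := by
  have hn : 0 < slots.length := List.length_pos_of_ne_nil hne
  rw [odoRun_eq_odoRunIdx]
  rw [odoRunIdx_eq_enumFrom slots.length _ (List.replicate k 0)
      (fun x hx => by rcases List.eq_of_mem_replicate hx with rfl; exact hn)
      (by simp)
      (by rw [enumFrom_replicate slots.length k 0 hn]; exact enumIdx_length_le slots.length k 0)]
  rw [enumFrom_replicate slots.length k 0 hn]
  rw [msCombos_eq_enumIdx slots k 0, List.map_map]
  refine List.map_congr_left ?_
  intro u hu
  obtain ⟨hpu, hbu⟩ := mem_enumIdx slots.length k 0 u hu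
  simp only [Function.comp]
  exact sorted2_eq_self_of_pairwise _ (combo_pairwise slots hp u hpu (fun t ht => (hbu t ht).2))

theorem slotsA_eq_slotsB (nv : Int) :
    (PySem.List.pyRange 0 nv 1).foldl (fun acc i =>
      acc ++ (PySem.List.pyRange i nv 1).foldl (fun acc2 j => acc2 ++ [(i, j)]) []) [] =
    (PySem.List.pyRange 0 nv 1).flatMap (fun i =>
      (PySem.List.pyRange i nv 1).map (fun j => (i, j))) := by
  have hsing : ∀ (f : Int → Int × Int) (l : List Int), (l.map (fun x => [f x])).flatten = l.map f := by
    intro f l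
    induction l with
    | nil => simp
    | cons a t ih => simp [ih]
  rw [PySem.List.foldl_append_eq_flatMap]
  simp [hsing]

-- ===== VERDICT (by name: the statement is the Claim_ definition above) =====
theorem edge_configs_py_spec : Claim_equal_edge_configs_py := by
  intro nv ne _ hpre
  unfold Spec_edge_configs_py
  by_cases h0 : ne = 0
  · subst h0; rfl
  · simp only [edge_configs_py, edge_configs_py_alt, if_neg h0, slotsA_eq_slotsB]
    set slots := (PySem.List.pyRange 0 nv 1).flatMap (fun i =>
      (PySem.List.pyRange i nv 1).map (fun j => (i, j))) with hs
    by_cases hsl : slots = []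
    · rw [if_pos hsl, hsl, msCombos_nil _ _ h0]
      simp
    · rw [if_neg hsl]
      have hnv : 0 < nv := by
        by_contra hc
        rw [not_lt] at hc
        apply hsl
        rw [hs, PySem.List.pyRange_one_eq_nil hc]
        simp
      have hne' : 0 < ne := by
        rcases hpre with h | h
        · rcases lt_or_eq_of_le h with h' | h'
          · exact h'
          · exact absurd h'.symm h0
        · omega
      have hcast : ((ne.toNat : Nat) : Int) = ne := Int.toNat_of_nonneg (le_of_lt hne')
      have hmain := main_case slots (hs ▸ slots_pairwise nv) hsl ne.toNat
      rw [hcast] at hmain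
      exact hmain
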